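-- pv_equiv track=rewrite | github.com/konovalovme2/DiagramTranslator | server/graph_utils.py | translate_graph
-- ===== SOURCE A (Python) =====
-- def translate_graph(graph, blocks, start_idx=0):
--     visited = set()
--     result = []
--
--     def dfs(node_idx, current_indent):
--         if node_idx >= len(blocks) or node_idx < 0:
--             result.append(" " * current_indent + f"Ошибка: блок {node_idx} не существует")
--             return
--
--         if node_idx in visited:
--             result.append(" " * current_indent + f"ЦИКЛ: возврат к '{blocks[node_idx]['text']}'")
--             return
--
--         visited.add(node_idx)
--         text = blocks[node_idx]["text"].strip()
--         result.append(" " * current_indent + text)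
--
--         neighbors = graph.get(node_idx, [])
--         for neighbor_idx in neighbors:
--             dfs(neighbor_idx, current_indent)
--
--     if start_idx >= len(blocks) or start_idx < 0:
--         return [f"Ошибка: стартовый блок {start_idx} не существует"]
--
--     dfs(start_idx, 0)
--     return result
-- ===== SOURCE B (Python) =====
-- def translate_graph(graph, blocks, start_idx=0):
--     if start_idx >= len(blocks) or start_idx < 0:
--         return [f"Ошибка: стартовый блок {start_idx} не существует"]
--     visited = set()
--     result = []
--     stack = [(start_idx, 0)]
--     while stack:
--         node_idx, indent = stack.pop()
--         if node_idx >= len(blocks) or node_idx < 0: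
--             result.append(" " * indent + f"Ошибка: блок {node_idx} не существует")
--         elif node_idx in visited:
--             result.append(" " * indent + f"ЦИКЛ: возврат к '{blocks[node_idx]['text']}'")
--         else:
--             visited.add(node_idx)
--             result.append(" " * indent + blocks[node_idx]["text"].strip())
--             for n in reversed(graph.get(node_idx, [])):
--                 stack.append((n, indent))
--     return result
-- ===== Notes on version B (the rewrite author's own statement) =====
-- stated objective: alternative
-- what changed: The recursive nested dfs helper is replaced by an explicit worklist loop over a stack of (node, indent) pairs, pushing neighbors in reversed order, which reproduces the same pre-order output without Python recursion.
import Mathlib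
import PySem

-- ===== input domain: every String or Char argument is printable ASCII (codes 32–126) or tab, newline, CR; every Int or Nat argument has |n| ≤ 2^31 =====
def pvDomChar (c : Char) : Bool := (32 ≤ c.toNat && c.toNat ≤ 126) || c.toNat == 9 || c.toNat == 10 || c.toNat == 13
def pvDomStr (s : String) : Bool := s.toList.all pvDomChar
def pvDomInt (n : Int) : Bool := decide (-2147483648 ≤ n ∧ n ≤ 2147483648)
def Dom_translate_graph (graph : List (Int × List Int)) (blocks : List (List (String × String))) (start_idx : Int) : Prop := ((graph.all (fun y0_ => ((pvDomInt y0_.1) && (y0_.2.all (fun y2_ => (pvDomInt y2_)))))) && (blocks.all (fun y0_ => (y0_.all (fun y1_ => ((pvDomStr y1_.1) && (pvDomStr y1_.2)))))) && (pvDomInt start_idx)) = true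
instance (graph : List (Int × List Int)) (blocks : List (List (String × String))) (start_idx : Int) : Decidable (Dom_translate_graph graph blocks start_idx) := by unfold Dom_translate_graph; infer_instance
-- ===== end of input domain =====

-- B replaces A's recursive nested `dfs` with an explicit stack-of-(node,indent) worklist loop; alternative decomposition, same output.

-- shared line builders: both Pythons contain the identical f-strings / lookups
-- " " * indent : for a negative int Python's str repetition gives "", matching Int.toNat's clamp
def pvSpaces (ind : Int) : String := String.ofList (List.replicate ind.toNat ' ')
-- blocks[node]["text"] : bounds are checked before every use, so the list default is never exposed;
-- the "" dict default stands in for the KeyError case excluded by Pre_ below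
def pvBlockText (blocks : List (List (String × String))) (node : Int) : String :=
  PySem.Dict.getD (PySem.Dict.mk (PySem.List.pyGetD blocks node [])) "text" ""
def pvLineErr (ind node : Int) : String :=
  pvSpaces ind ++ "Ошибка: блок " ++ PySem.Int.toStr node ++ " не существует"
def pvLineCyc (ind : Int) (blocks : List (List (String × String))) (node : Int) : String :=
  pvSpaces ind ++ "ЦИКЛ: возврат к '" ++ pvBlockText blocks node ++ "'"
def pvLineText (ind : Int) (blocks : List (List (String × String))) (node : Int) : String :=
  pvSpaces ind ++ PySem.Str.strip (pvBlockText blocks node)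
def pvStartErr (start_idx : Int) : String :=
  "Ошибка: стартовый блок " ++ PySem.Int.toStr start_idx ++ " не существует"
-- graph.get(node, [])
def pvNeighbors (graph : List (Int × List Int)) (node : Int) : List Int :=
  PySem.Dict.getD (PySem.Dict.mk graph) node []

-- number of in-range nodes not yet visited: termination measure for B's loop, fuel bound for A's dfs
def pvUnvis (blocks : List (List (String × String))) (visited : PySem.Set Int) : Nat :=
  ((Finset.range blocks.length).filter (fun i : Nat => ¬ ((i : Int) ∈ visited))).card

-- ===== PORT A =====
-- A's recursion always terminates (each productive call shrinks the unvisited set), so the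
-- fuel blocks.length + 1 below is provably never exhausted; it only drives Lean's recursion.
mutual
def pvDfs (graph : List (Int × List Int)) (blocks : List (List (String × String))) :
    Nat → Int → Int → PySem.Set Int → List String → PySem.Set Int × List String
  | 0, _, _, visited, result => (visited, result)       -- dead branch: fuel is always sufficient
  | fuel + 1, node, ind, visited, result =>
    if (blocks.length : Int) ≤ node ∨ node < 0 then
      (visited, result ++ [pvLineErr ind node])
    else if PySem.Set.contains visited node then
      (visited, result ++ [pvLineCyc ind blocks node])
    else
      pvDfsList graph blocks fuel (pvNeighbors graph node) ind
        (PySem.Set.add visited node) (result ++ [pvLineText ind blocks node])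
termination_by fuel _ _ _ _ => (fuel, 0)

-- the `for neighbor_idx in neighbors: dfs(neighbor_idx, current_indent)` loop
def pvDfsList (graph : List (Int × List Int)) (blocks : List (List (String × String))) :
    Nat → List Int → Int → PySem.Set Int → List String → PySem.Set Int × List String
  | _, [], _, visited, result => (visited, result)
  | fuel, n :: ns, ind, visited, result =>
    let p := pvDfs graph blocks fuel n ind visited result
    pvDfsList graph blocks fuel ns ind p.1 p.2
termination_by fuel ns _ _ _ => (fuel, ns.length + 1)
end


def translate_graph (graph : List (Int × List Int)) (blocks : List (List (String × String))) (start_idx : Int) : List String :=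
  if (blocks.length : Int) ≤ start_idx ∨ start_idx < 0 then [pvStartErr start_idx]
  else (pvDfs graph blocks (blocks.length + 1) start_idx 0 PySem.Set.empty []).2

-- ===== PORT B =====
-- termination lemmas for the worklist loop (cited by its decreasing_by)
theorem pvUnvis_add_lt (blocks : List (List (String × String))) (v : PySem.Set Int) (x : Int)
    (h0 : 0 ≤ x) (h1 : x < (blocks.length : Int)) (h2 : x ∉ v) :
    pvUnvis blocks (PySem.Set.add v x) < pvUnvis blocks v := by
  apply Finset.card_lt_card
  constructor
  · intro i hi
    simp only [Finset.mem_filter, PySem.Set.mem_add] at hi ⊢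
    exact ⟨hi.1, fun h => hi.2 (Or.inl h)⟩
  · intro hsub
    have hx : x.toNat ∈ (Finset.range blocks.length).filter (fun i : Nat => ¬ ((i : Int) ∈ v)) := by
      simp only [Finset.mem_filter, Finset.mem_range]
      refine ⟨by omega, ?_⟩
      rwa [Int.toNat_of_nonneg h0]
    have := hsub hx
    simp [Finset.mem_filter, PySem.Set.mem_add, Int.toNat_of_nonneg h0] at this

-- stack with head = top of Python's list: `stack.pop()` takes the head, and
-- the reversed-neighbor pushes put the neighbors, in order, at the head
def pvLoop (graph : List (Int × List Int)) (blocks : List (List (String × String))) :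
    List (Int × Int) → PySem.Set Int → List String → List String
  | [], _, result => result
  | (node, ind) :: rest, visited, result =>
    if (blocks.length : Int) ≤ node ∨ node < 0 then
      pvLoop graph blocks rest visited (result ++ [pvLineErr ind node])
    else if h2 : PySem.Set.contains visited node then
      pvLoop graph blocks rest visited (result ++ [pvLineCyc ind blocks node])
    else
      pvLoop graph blocks ((pvNeighbors graph node).map (fun n => (n, ind)) ++ rest)
        (PySem.Set.add visited node) (result ++ [pvLineText ind blocks node])
termination_by stack visited _ => (pvUnvis blocks visited, stack.length)
decreasing_by
  all_goals simp_wf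
  · exact Prod.Lex.right _ (Nat.lt_succ_self _)
  · exact Prod.Lex.right _ (Nat.lt_succ_self _)
  · apply Prod.Lex.left
    apply pvUnvis_add_lt
    · omega
    · omega
    · intro hmem
      exact h2 ((PySem.Set.contains_iff visited node).mpr hmem)

def translate_graph_alt (graph : List (Int × List Int)) (blocks : List (List (String × String))) (start_idx : Int) : List String :=
  if (blocks.length : Int) ≤ start_idx ∨ start_idx < 0 then [pvStartErr start_idx]
  else pvLoop graph blocks [(start_idx, 0)] PySem.Set.empty []

-- ===== PRECONDITION & SPEC =====
-- graph reachability, used only by Pre_: in-range status and one closure step adding the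
-- in-range neighbors of every in-range member (no traversal order, no visited set, no output)
def pvInR (blocks : List (List (String × String))) (n : Int) : Bool :=
  decide (0 ≤ n ∧ n < (blocks.length : Int))
def pvReachStep (graph : List (Int × List Int)) (blocks : List (List (String × String)))
    (s : PySem.Set Int) : PySem.Set Int :=
  s.foldl (fun acc m =>
    if pvInR blocks m then
      (pvNeighbors graph m).foldl
        (fun a n => if pvInR blocks n then PySem.Set.add a n else a) acc
    else acc) s
-- nodes whose block dict A actually indexes with ["text"]: everything reachable from the start
-- through in-range nodes (blocks.length closure steps always reach the fixpoint)
def pvReach (graph : List (Int × List Int)) (blocks : List (List (String × String)))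
    (start_idx : Int) : PySem.Set Int :=
  (pvReachStep graph blocks)^[blocks.length + 1] (PySem.Set.ofList [start_idx])

-- Pre_ excludes exactly the inputs on which A raises: with an in-range start, some block that is
-- reachable from it (through in-range edges) lacks a "text" key, so A's dict lookup raises
-- KeyError there (B raises the same KeyError); on every other input A returns normally.
def Pre_translate_graph (graph : List (Int × List Int)) (blocks : List (List (String × String))) (start_idx : Int) : Prop :=
  (0 ≤ start_idx ∧ start_idx < (blocks.length : Int)) →
    ∀ v ∈ pvReach graph blocks start_idx,
      (PySem.Dict.mk (PySem.List.pyGetD blocks v [])).contains "text" = true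
instance (graph : List (Int × List Int)) (blocks : List (List (String × String))) (start_idx : Int) : Decidable (Pre_translate_graph graph blocks start_idx) := by unfold Pre_translate_graph; infer_instance

def pvWitness_translate_graph : (List (Int × List Int)) × (List (List (String × String))) × Int :=
  ([(0, [1, 0]), (1, [])], [[("text", " a ")], [("text", "b")]], 0)

def Spec_translate_graph (graph : List (Int × List Int)) (blocks : List (List (String × String))) (start_idx : Int) (out : List String) : Prop := out = translate_graph_alt graph blocks start_idx
instance (graph : List (Int × List Int)) (blocks : List (List (String × String))) (start_idx : Int) (out : List String) : Decidable (Spec_translate_graph graph blocks start_idx out) := by unfold Spec_translate_graph; infer_instance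

-- ===== CLAIM (what is proved, stated in full; the proofs are below) =====
def Claim_equal_translate_graph : Prop := ∀ (graph : List (Int × List Int)) (blocks : List (List (String × String))) (start_idx : Int), Dom_translate_graph graph blocks start_idx → Pre_translate_graph graph blocks start_idx → Spec_translate_graph graph blocks start_idx (translate_graph graph blocks start_idx)

-- ===== LEMMAS AND PROOFS =====

theorem pvUnvis_add_le (blocks : List (List (String × String))) (v : PySem.Set Int) (x : Int) :
    pvUnvis blocks (PySem.Set.add v x) ≤ pvUnvis blocks v := by
  apply Finset.card_le_card
  intro i hi
  simp only [Finset.mem_filter, PySem.Set.mem_add] at hi ⊢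
  exact ⟨hi.1, fun h => hi.2 (Or.inl h)⟩

theorem pvUnvis_empty (blocks : List (List (String × String))) :
    pvUnvis blocks PySem.Set.empty = blocks.length := by
  unfold pvUnvis
  rw [Finset.filter_true_of_mem, Finset.card_range]
  intro i _
  simp [PySem.Set.empty]

-- dfs only grows the visited set, so the measure never increases
theorem pvMono (graph : List (Int × List Int)) (blocks : List (List (String × String))) :
    ∀ fuel : Nat,
      (∀ (node ind : Int) (v : PySem.Set Int) (r : List String),
        pvUnvis blocks (pvDfs graph blocks fuel node ind v r).1 ≤ pvUnvis blocks v) ∧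
      (∀ (ns : List Int) (ind : Int) (v : PySem.Set Int) (r : List String),
        pvUnvis blocks (pvDfsList graph blocks fuel ns ind v r).1 ≤ pvUnvis blocks v) := by
  intro fuel
  induction fuel with
  | zero =>
    constructor
    · intro node ind v r; simp [pvDfs]
    · intro ns
      induction ns with
      | nil => intro ind v r; simp [pvDfsList]
      | cons n ns ihn =>
        intro ind v r
        simp only [pvDfsList, pvDfs]
        exact ihn ind v r
  | succ f ih =>
    have hA : ∀ (node ind : Int) (v : PySem.Set Int) (r : List String),
        pvUnvis blocks (pvDfs graph blocks (f + 1) node ind v r).1 ≤ pvUnvis blocks v := by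
      intro node ind v r
      simp only [pvDfs]
      split_ifs with h1 hc
      · exact le_refl _
      · exact le_refl _
      · exact le_trans (ih.2 _ _ _ _) (pvUnvis_add_le blocks v node)
    refine ⟨hA, ?_⟩
    intro ns
    induction ns with
    | nil => intro ind v r; simp [pvDfsList]
    | cons n ns ihn =>
      intro ind v r
      simp only [pvDfsList]
      exact le_trans (ihn _ _ _) (hA n ind v r)

-- the worklist loop simulates the recursion: popping one pending node runs dfs on it,
-- and a block of pending neighbors runs the dfs-over-neighbors loop
theorem pvKey (graph : List (Int × List Int)) (blocks : List (List (String × String))) :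
    ∀ fuel : Nat,
      (∀ (node ind : Int) (v : PySem.Set Int) (r : List String) (rest : List (Int × Int)),
        pvUnvis blocks v + 1 ≤ fuel →
        pvLoop graph blocks ((node, ind) :: rest) v r =
          pvLoop graph blocks rest (pvDfs graph blocks fuel node ind v r).1
            (pvDfs graph blocks fuel node ind v r).2) ∧
      (∀ (ns : List Int) (ind : Int) (v : PySem.Set Int) (r : List String) (rest : List (Int × Int)),
        pvUnvis blocks v + 1 ≤ fuel →
        pvLoop graph blocks (ns.map (fun n => (n, ind)) ++ rest) v r =
          pvLoop graph blocks rest (pvDfsList graph blocks fuel ns ind v r).1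
            (pvDfsList graph blocks fuel ns ind v r).2) := by
  intro fuel
  induction fuel with
  | zero =>
    constructor
    · intro _ _ _ _ _ h; omega
    · intro _ _ _ _ _ h; omega
  | succ f ih =>
    have hA : ∀ (node ind : Int) (v : PySem.Set Int) (r : List String) (rest : List (Int × Int)),
        pvUnvis blocks v + 1 ≤ f + 1 →
        pvLoop graph blocks ((node, ind) :: rest) v r =
          pvLoop graph blocks rest (pvDfs graph blocks (f + 1) node ind v r).1
            (pvDfs graph blocks (f + 1) node ind v r).2 := by
      intro node ind v r rest hf
      rw [pvLoop]
      simp only [pvDfs]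
      split_ifs with h1 hc
      · rfl
      · rfl
      · have hlt : pvUnvis blocks (PySem.Set.add v node) + 1 ≤ f := by
          have hnm : node ∉ v := fun hm => hc ((PySem.Set.contains_iff v node).mpr hm)
          have := pvUnvis_add_lt blocks v node (by omega) (by omega) hnm
          omega
        exact ih.2 (pvNeighbors graph node) ind (PySem.Set.add v node)
          (r ++ [pvLineText ind blocks node]) rest hlt
    refine ⟨hA, ?_⟩
    intro ns
    induction ns with
    | nil =>
      intro ind v r rest hf
      simp [pvDfsList]
    | cons n ns ihn =>
      intro ind v r rest hf
      simp only [List.map_cons, List.cons_append, pvDfsList]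
      rw [hA n ind v r (ns.map (fun n => (n, ind)) ++ rest) hf]
      have hmono : pvUnvis blocks (pvDfs graph blocks (f + 1) n ind v r).1 + 1 ≤ f + 1 := by
        have := (pvMono graph blocks (f + 1)).1 n ind v r
        omega
      exact ihn ind (pvDfs graph blocks (f + 1) n ind v r).1
        (pvDfs graph blocks (f + 1) n ind v r).2 rest hmono

-- ===== VERDICT (by name: the statement is the Claim_ definition above) =====
theorem translate_graph_spec : Claim_equal_translate_graph := by
  intro graph blocks start_idx _ _
  unfold Spec_translate_graph translate_graph translate_graph_alt
  split_ifs with h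
  · rfl
  · have hf : pvUnvis blocks PySem.Set.empty + 1 ≤ blocks.length + 1 := by
      rw [pvUnvis_empty]
    rw [(pvKey graph blocks (blocks.length + 1)).1 start_idx 0 PySem.Set.empty [] [] hf]
    rw [pvLoop]
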